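-- pv_equiv track=rewrite | github.com/emuuli/advent_of_code_2018 | 13_exercise/solution.py | fill_empty_spots
-- ===== SOURCE A (Python) =====
-- def fill_empty_spots(i_list, x_len, y_len):
--     result = [["" for x in range(y_len)] for y in range(x_len)]
--     for i in range(x_len):
--         for j in range(y_len):
--             if j >= len(i_list[i]):
--                 result[i][j] = ""
--             else:
--                 result[i][j] = i_list[i][j]
--     return result
-- ===== SOURCE B (Python) =====
-- def fill_empty_spots(i_list, x_len, y_len):
--     # slice-and-pad: pad the row list to x_len rows, then pad each row to y_len cells
--     n = max(y_len, 0)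
--     m = max(x_len, 0)
--     rows = list(i_list[:m]) + [[]] * (m - len(i_list))
--     return [list(r)[:n] + [""] * (n - len(r)) for r in rows]
-- ===== Notes on version B (the rewrite author's own statement) =====
-- stated objective: simpler
-- what changed: Replaces A's preallocated grid with per-cell index-guarded assignment loops by a slice-then-pad construction: pad the row list to x_len rows, then pad each row (sliced to y_len) with empty strings.
import Mathlib
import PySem

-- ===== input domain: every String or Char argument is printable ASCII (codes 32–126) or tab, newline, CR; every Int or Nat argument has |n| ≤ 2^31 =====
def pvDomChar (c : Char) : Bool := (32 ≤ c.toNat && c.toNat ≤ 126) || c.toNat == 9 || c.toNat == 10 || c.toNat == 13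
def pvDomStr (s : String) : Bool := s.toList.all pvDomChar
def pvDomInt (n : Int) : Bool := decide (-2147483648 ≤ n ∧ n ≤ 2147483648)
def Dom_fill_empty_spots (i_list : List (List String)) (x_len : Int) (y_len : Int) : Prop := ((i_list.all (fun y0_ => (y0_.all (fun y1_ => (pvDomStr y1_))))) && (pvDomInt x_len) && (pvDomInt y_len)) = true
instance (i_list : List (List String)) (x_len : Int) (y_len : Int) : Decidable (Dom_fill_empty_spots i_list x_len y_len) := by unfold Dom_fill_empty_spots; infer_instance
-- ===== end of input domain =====

-- B builds the grid by slice-then-pad (pad rows to x_len, each row to y_len) instead of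
-- A's per-cell index-guarded assignment loops; same cost, simpler decomposition.

-- ===== PORT A =====
def fill_empty_spots (i_list : List (List String)) (x_len : Int) (y_len : Int) : List (List String) :=
  -- result is preallocated and then every cell is assigned; ported as computing each assigned cell
  (PySem.List.pyRange 0 x_len 1).map (fun i =>
    let row := (PySem.List.pyGet? i_list i).getD []   -- i_list[i]; in range under Pre_ when this is reached
    (PySem.List.pyRange 0 y_len 1).map (fun j =>
      if (row.length : Int) ≤ j then "" else PySem.List.pyGetD row j ""))

-- ===== PORT B =====
def fill_empty_spots_alt (i_list : List (List String)) (x_len : Int) (y_len : Int) : List (List String) :=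
  let n : Int := max y_len 0
  let m : Int := max x_len 0
  let rows := PySem.List.slice i_list none (some m) ++ List.replicate (m - (i_list.length : Int)).toNat []
  rows.map (fun r => PySem.List.slice r none (some n) ++ List.replicate (n - (r.length : Int)).toNat "")

-- ===== PRECONDITION & SPEC =====
-- Pre_ excludes exactly the inputs where Python A raises IndexError (x_len rows demanded
-- of a shorter i_list while a cell is actually read, i.e. y_len > 0).
def Pre_fill_empty_spots (i_list : List (List String)) (x_len : Int) (y_len : Int) : Prop :=
  x_len ≤ (i_list.length : Int) ∨ y_len ≤ 0
instance (i_list : List (List String)) (x_len : Int) (y_len : Int) : Decidable (Pre_fill_empty_spots i_list x_len y_len) := by unfold Pre_fill_empty_spots; infer_instance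

def pvWitness_fill_empty_spots : List (List String) × Int × Int := ([["a"], []], 2, 3)

def Spec_fill_empty_spots (i_list : List (List String)) (x_len : Int) (y_len : Int) (out : List (List String)) : Prop := out = fill_empty_spots_alt i_list x_len y_len
instance (i_list : List (List String)) (x_len : Int) (y_len : Int) (out : List (List String)) : Decidable (Spec_fill_empty_spots i_list x_len y_len out) := by unfold Spec_fill_empty_spots; infer_instance

-- ===== CLAIM (what is proved, stated in full; the proofs are below) =====
def Claim_equal_fill_empty_spots : Prop := ∀ (i_list : List (List String)) (x_len : Int) (y_len : Int), Dom_fill_empty_spots i_list x_len y_len → Pre_fill_empty_spots i_list x_len y_len → Spec_fill_empty_spots i_list x_len y_len (fill_empty_spots i_list x_len y_len)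
-- ===== LEMMAS AND PROOFS =====

-- slice-then-pad of a list to length t is the table of its (defaulted) entries
theorem pv_pad_eq_table {α : Type} (d : α) (row : List α) (t : Nat) :
    row.take t ++ List.replicate (t - row.length) d
      = (List.range t).map (fun k => row.getD k d) := by
  induction row generalizing t with
  | nil => simp [List.map_const']
  | cons a row ih =>
    cases t with
    | zero => simp
    | succ t =>
      rw [List.range_succ_eq_map]
      simp only [List.take_succ_cons, List.length_cons, Nat.succ_sub_succ,
        List.map_cons, List.map_map]
      simp only [List.getD_cons_zero, Function.comp_def, Nat.succ_eq_add_one,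
        List.getD_cons_succ, List.cons_append]
      rw [ih]

theorem fill_empty_spots_eq_alt (i_list : List (List String)) (x_len : Int) (y_len : Int) :
    fill_empty_spots i_list x_len y_len = fill_empty_spots_alt i_list x_len y_len := by
  unfold fill_empty_spots fill_empty_spots_alt
  dsimp only
  have hmx : (max x_len 0) = ((x_len.toNat : Nat) : Int) := by omega
  have hmy : (max y_len 0) = ((y_len.toNat : Nat) : Int) := by omega
  rw [hmx, hmy]
  simp only [PySem.List.slice_to_natCast, Int.toNat_sub, PySem.List.pyRange_one, Int.sub_zero]
  rw [pv_pad_eq_table ([] : List String) i_list x_len.toNat]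
  simp only [List.map_map]
  apply List.map_congr_left
  intro k hk
  simp only [List.mem_range] at hk
  simp only [Function.comp_def, Int.zero_add, PySem.List.pyGet?_natCast, PySem.List.pyGetD_natCast]
  have hrow : (i_list[k]?).getD [] = i_list.getD k [] := rfl
  rw [hrow, pv_pad_eq_table ("" : String) (i_list.getD k []) y_len.toNat]
  apply List.map_congr_left
  intro j hj
  simp only [List.mem_range] at hj
  by_cases h : (i_list.getD k []).length ≤ j
  · rw [if_pos (by exact_mod_cast h), List.getD_eq_default _ _ h]
  · rw [if_neg (by exact_mod_cast h)]

-- ===== VERDICT (by name: the statement is the Claim_ definition above) =====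
theorem fill_empty_spots_spec : Claim_equal_fill_empty_spots := by
  intro i_list x_len y_len _ _
  unfold Spec_fill_empty_spots
  exact fill_empty_spots_eq_alt i_list x_len y_len
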